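-- pv_equiv track=rewrite | github.com/hauteuar/analyzer | mainframe_analyzer/modules/agentic_rag_chat.py | _preprocess_cobol_code
-- ===== SOURCE A (Python) =====
-- def _preprocess_cobol_code(source_code: str) -> str:
--     """Preprocess COBOL code for better semantic search"""
--     lines = source_code.split('\n')
--     processed_lines = []
--
--     for line in lines:
--         line = line.strip()
--         if not line or line.startswith('*'):
--             continue
--
--         line = line.upper()
--
--         # Normalize COBOL constructs
--         replacements = {
--             'PIC X(': 'TEXT_FIELD ',
--             'PIC 9(': 'NUMERIC_FIELD ',
--             'PIC S9(': 'SIGNED_NUMERIC_FIELD ',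
--             'MOVE ': 'ASSIGN ',
--             'COMPUTE ': 'CALCULATE ',
--             'EXEC CICS': 'TRANSACTION ',
--             'CALL ': 'INVOKE ',
--             'PERFORM ': 'EXECUTE ',
--         }
--
--         for old, new in replacements.items():
--             line = line.replace(old, new)
--
--         processed_lines.append(line)
--
--     return ' '.join(processed_lines)
-- ===== SOURCE B (Python) =====
-- # B: staged pipeline (strip/filter/upper comprehensions) + one left-to-right
-- # scan per line with an explicit if-chain matcher, instead of A's single fold
-- # with eight sequential whole-line str.replace passes.
--
-- def _match(line, i):
--     if line.startswith('PIC X(', i): return 'TEXT_FIELD ', 6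
--     if line.startswith('PIC 9(', i): return 'NUMERIC_FIELD ', 6
--     if line.startswith('PIC S9(', i): return 'SIGNED_NUMERIC_FIELD ', 7
--     if line.startswith('MOVE ', i): return 'ASSIGN ', 5
--     if line.startswith('COMPUTE ', i): return 'CALCULATE ', 8
--     if line.startswith('EXEC CICS', i): return 'TRANSACTION ', 9
--     if line.startswith('CALL ', i): return 'INVOKE ', 5
--     if line.startswith('PERFORM ', i): return 'EXECUTE ', 8
--     return None, 0
--
-- def _normalize(line):
--     out = []
--     i, n = 0, len(line)
--     while i < n:
--         rep, k = _match(line, i)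
--         if rep is not None:
--             out.append(rep)
--             i += k
--         else:
--             out.append(line[i])
--             i += 1
--     return ''.join(out)
--
-- def _preprocess_cobol_code(source_code: str) -> str:
--     stripped = [raw.strip() for raw in source_code.split('\n')]
--     kept = [line.upper() for line in stripped if line and not line.startswith('*')]
--     return ' '.join(_normalize(line) for line in kept)
-- ===== Notes on version B (the rewrite author's own statement) =====
-- stated objective: alternative
-- what changed: A is one fold over lines doing strip/skip/upper and then eight sequential whole-line str.replace passes per line; B is a staged pipeline (strip all lines, filter, upper) and normalizes each line in one left-to-right scan with an explicit if-chain matcher, so each original occurrence is rewritten exactly once.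
-- intended difference: On inputs where a kept (nonempty, non-comment) line's uppercase contains 'EXEC CICPIC S9(', A's sequential passes chain - the inserted 'SIGNED_NUMERIC_FIELD ' completes a new 'EXEC CICS' occurrence that A then rewrites to 'TRANSACTION ' (e.g. 'TRANSACTION IGNED_NUMERIC_FIELD ') - while B rewrites each original occurrence once ('EXEC CICSIGNED_NUMERIC_FIELD '), which is the intended normalization. — e.g. on _preprocess_cobol_code("EXEC CICPIC S9("): A returns "TRANSACTION IGNED_NUMERIC_FIELD ", B returns "EXEC CICSIGNED_NUMERIC_FIELD "
import Mathlib
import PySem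

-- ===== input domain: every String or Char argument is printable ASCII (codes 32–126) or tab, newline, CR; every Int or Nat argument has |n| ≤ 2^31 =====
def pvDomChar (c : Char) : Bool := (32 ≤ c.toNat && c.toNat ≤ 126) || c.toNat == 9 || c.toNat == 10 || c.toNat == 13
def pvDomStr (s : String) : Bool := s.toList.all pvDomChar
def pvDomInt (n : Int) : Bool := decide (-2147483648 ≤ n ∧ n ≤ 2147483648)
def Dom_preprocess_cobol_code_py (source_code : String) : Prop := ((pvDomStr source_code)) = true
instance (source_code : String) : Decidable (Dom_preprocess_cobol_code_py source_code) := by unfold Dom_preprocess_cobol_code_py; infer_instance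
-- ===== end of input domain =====

-- B is a staged filter/map pipeline normalizing each kept line in ONE left-to-right scan with an
-- explicit if-chain matcher, instead of A's single fold with eight sequential whole-line replace
-- passes per line; return values agree except on lines containing "EXEC CICPIC S9(", where A's
-- sequential passes chain (see D_ below).

-- ===== PORT A =====
-- the 'replacements' dict of A, as an association list in insertion order
def pvReplC : List (List Char × List Char) :=
  [("PIC X(".toList, "TEXT_FIELD ".toList),
   ("PIC 9(".toList, "NUMERIC_FIELD ".toList),
   ("PIC S9(".toList, "SIGNED_NUMERIC_FIELD ".toList),
   ("MOVE ".toList, "ASSIGN ".toList),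
   ("COMPUTE ".toList, "CALCULATE ".toList),
   ("EXEC CICS".toList, "TRANSACTION ".toList),
   ("CALL ".toList, "INVOKE ".toList),
   ("PERFORM ".toList, "EXECUTE ".toList)]

def preprocess_cobol_code_py (source_code : String) : String :=
  -- lines = source_code.split('\n')
  let lines := PySem.Chars.splitOn source_code.toList "\n".toList
  -- for line in lines: strip, skip empty / '*' lines, upper, then the 8 sequential .replace passes
  let processed := lines.foldl (fun acc line =>
    let l := PySem.Chars.strip line
    if l = [] ∨ PySem.Chars.startswith l "*".toList = true then acc
    else acc ++ [pvReplC.foldl (fun s p => PySem.Chars.replace s p.1 p.2) (PySem.Chars.upper l)]) []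
  -- ' '.join(processed_lines)
  String.ofList (PySem.Chars.join " ".toList processed)

-- ===== PORT B =====
-- B's _match: an explicit if-chain trying each construct at the current position
-- (returns the replacement together with the matched key's length)
def pvMatch (l : List Char) : Option (List Char × Nat) :=
  if "PIC X(".toList.isPrefixOf l then some ("TEXT_FIELD ".toList, 6)
  else if "PIC 9(".toList.isPrefixOf l then some ("NUMERIC_FIELD ".toList, 6)
  else if "PIC S9(".toList.isPrefixOf l then some ("SIGNED_NUMERIC_FIELD ".toList, 7)
  else if "MOVE ".toList.isPrefixOf l then some ("ASSIGN ".toList, 5)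
  else if "COMPUTE ".toList.isPrefixOf l then some ("CALCULATE ".toList, 8)
  else if "EXEC CICS".toList.isPrefixOf l then some ("TRANSACTION ".toList, 9)
  else if "CALL ".toList.isPrefixOf l then some ("INVOKE ".toList, 5)
  else if "PERFORM ".toList.isPrefixOf l then some ("EXECUTE ".toList, 8)
  else none

-- B's _normalize while-loop, step for step ('i < n' bounds the iterations = the fuel): emit the
-- replacement and jump past the matched key, or copy one character
def pvNormGo : Nat → List Char → List Char
  | _, [] => []
  | 0, l => l
  | fuel+1, c :: t =>
    match pvMatch (c :: t) with
    | some (rep, k) => rep ++ pvNormGo fuel ((c :: t).drop k)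
    | none => c :: pvNormGo fuel t

def pvSub (cs : List Char) : List Char := pvNormGo cs.length cs

def preprocess_cobol_code_py_alt (source_code : String) : String :=
  -- stripped = [raw.strip() for raw in source_code.split('\n')]
  let stripped := (PySem.Chars.splitOn source_code.toList "\n".toList).map PySem.Chars.strip
  -- kept = [line.upper() for line in stripped if line and not line.startswith('*')]
  let kept := (stripped.filter (fun l => !l.isEmpty && !(PySem.Chars.startswith l "*".toList))).map PySem.Chars.upper
  -- ' '.join(_normalize(line) for line in kept)
  String.ofList (PySem.Chars.join " ".toList (kept.map pvSub))

-- ===== PRECONDITION & SPEC =====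
-- On inputs with a kept (nonempty, non-comment) line whose uppercase contains "EXEC CICPIC S9(",
-- A's sequential passes chain — the inserted "SIGNED_NUMERIC_FIELD " completes a new "EXEC CICS"
-- that A then rewrites to "TRANSACTION " — while B replaces each original occurrence exactly once
-- left to right, which is the intended normalization.
def pvBad : List Char := "EXEC CICPIC S9(".toList

def D_preprocess_cobol_code_py (source_code : String) : Prop :=
  ∃ ln ∈ PySem.Chars.splitOn source_code.toList "\n".toList,
    PySem.Chars.strip ln ≠ [] ∧
    PySem.Chars.startswith (PySem.Chars.strip ln) "*".toList = false ∧
    PySem.Chars.isIn pvBad (PySem.Chars.upper (PySem.Chars.strip ln)) = true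
instance (source_code : String) : Decidable (D_preprocess_cobol_code_py source_code) := by
  unfold D_preprocess_cobol_code_py; infer_instance

def Spec_preprocess_cobol_code_py (source_code : String) (out : String) : Prop :=
  ¬ D_preprocess_cobol_code_py source_code → out = preprocess_cobol_code_py_alt source_code
instance (source_code : String) (out : String) : Decidable (Spec_preprocess_cobol_code_py source_code out) := by
  unfold Spec_preprocess_cobol_code_py; infer_instance

def pvDiffWitness_preprocess_cobol_code_py : String := "EXEC CICPIC S9("
def pvDiffWitnessOut_preprocess_cobol_code_py : String × String :=
  ("TRANSACTION IGNED_NUMERIC_FIELD ", "EXEC CICSIGNED_NUMERIC_FIELD ")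

-- ===== CLAIM (what is proved, stated in full; the proofs are below) =====
def Claim_unchanged_preprocess_cobol_code_py : Prop := ∀ (source_code : String), Dom_preprocess_cobol_code_py source_code → Spec_preprocess_cobol_code_py source_code (preprocess_cobol_code_py source_code)
def Claim_exact_preprocess_cobol_code_py : Prop := ∀ (source_code : String), Dom_preprocess_cobol_code_py source_code → D_preprocess_cobol_code_py source_code → preprocess_cobol_code_py source_code ≠ preprocess_cobol_code_py_alt source_code
def Claim_changed_preprocess_cobol_code_py : Prop := Dom_preprocess_cobol_code_py (pvDiffWitness_preprocess_cobol_code_py) ∧ D_preprocess_cobol_code_py (pvDiffWitness_preprocess_cobol_code_py) ∧ preprocess_cobol_code_py (pvDiffWitness_preprocess_cobol_code_py) = pvDiffWitnessOut_preprocess_cobol_code_py.1 ∧ preprocess_cobol_code_py_alt (pvDiffWitness_preprocess_cobol_code_py) = pvDiffWitnessOut_preprocess_cobol_code_py.2 ∧ pvDiffWitnessOut_preprocess_cobol_code_py.1 ≠ pvDiffWitnessOut_preprocess_cobol_code_py.2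

-- ===== LEMMAS AND PROOFS =====

-- A's rule table, reused by the proofs as the common reference point
def pvRules : List (List Char × List Char) := pvReplC

-- Python str.replace as plain structural recursion (k the key, v the value)
def pvRep (k v : List Char) : List Char → List Char
  | [] => []
  | c :: t => if k.isPrefixOf (c :: t) then v ++ pvRep k v (t.drop (k.length - 1)) else c :: pvRep k v t
termination_by cs => cs.length
decreasing_by
  · simp only [List.length_drop, List.length_cons]; omega
  · simp only [List.length_cons]; omega

-- one-pass multi-replace over an arbitrary rule list (pvSub computes pvMsub pvRules, below)
def pvMsub (kv : List (List Char × List Char)) : List Char → List Char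
  | [] => []
  | c :: t =>
    match kv.find? (fun p => p.1.isPrefixOf (c :: t)) with
    | some p => p.2 ++ pvMsub kv (t.drop (p.1.length - 1))
    | none => c :: pvMsub kv t
termination_by cs => cs.length
decreasing_by
  · simp only [List.length_drop, List.length_cons]; omega
  · simp only [List.length_cons]; omega

-- unfolding lemmas
lemma pvRep_nil (k v : List Char) : pvRep k v [] = [] := by rw [pvRep]
lemma pvRep_cons_pos {k : List Char} (v : List Char) {c t} (h : k.isPrefixOf (c :: t) = true) :
    pvRep k v (c :: t) = v ++ pvRep k v (t.drop (k.length - 1)) := by rw [pvRep, if_pos h]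
lemma pvRep_cons_neg {k : List Char} (v : List Char) {c t} (h : ¬ k.isPrefixOf (c :: t) = true) :
    pvRep k v (c :: t) = c :: pvRep k v t := by rw [pvRep, if_neg h]
lemma pvMsub_nil (kv : List (List Char × List Char)) : pvMsub kv [] = [] := by rw [pvMsub]
lemma pvMsub_cons_some {kv : List (List Char × List Char)} {c t p}
    (h : kv.find? (fun p => p.1.isPrefixOf (c :: t)) = some p) :
    pvMsub kv (c :: t) = p.2 ++ pvMsub kv (t.drop (p.1.length - 1)) := by rw [pvMsub, h]
lemma pvMsub_cons_none {kv : List (List Char × List Char)} {c t}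
    (h : kv.find? (fun p => p.1.isPrefixOf (c :: t)) = none) :
    pvMsub kv (c :: t) = c :: pvMsub kv t := by rw [pvMsub, h]

lemma pvMsub_no_keys : ∀ l, pvMsub [] l = l := by
  intro l; induction l with
  | nil => rw [pvMsub]
  | cons c t ih => rw [pvMsub_cons_none (by simp), ih]

-- every key of the table is nonempty
lemma pvRulesKeyNe : ∀ p ∈ pvRules, p.1 ≠ [] := by decide

-- B's if-chain matcher computes the ordered find? over A's table (with the key's length)
lemma pvMatch_find (l : List Char) :
    pvMatch l = (pvRules.find? (fun p => p.1.isPrefixOf l)).map (fun p => (p.2, p.1.length)) := by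
  unfold pvMatch
  rw [show pvRules = pvReplC from rfl]
  unfold pvReplC
  split_ifs <;> simp_all

-- B's bounded while-loop computes the one-pass multi-replace over A's table
lemma pvNormGo_spec : ∀ (fuel : Nat) (l : List Char), l.length ≤ fuel →
    pvNormGo fuel l = pvMsub pvRules l := by
  intro fuel
  induction fuel with
  | zero =>
    intro l h
    have : l = [] := List.eq_nil_of_length_eq_zero (Nat.le_zero.mp h)
    subst this; rw [pvNormGo, pvMsub]
  | succ n ih =>
    intro l h
    match l with
    | [] => rw [pvNormGo, pvMsub]
    | c :: t =>
      have hm := pvMatch_find (c :: t)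
      cases hf : pvRules.find? (fun p => p.1.isPrefixOf (c :: t)) with
      | some p =>
        rw [hf, Option.map_some] at hm
        have hne : p.1 ≠ [] := pvRulesKeyNe p (List.mem_of_find?_eq_some hf)
        have hdrop : (c :: t).drop p.1.length = t.drop (p.1.length - 1) := by
          cases hpk : p.1 with
          | nil => exact absurd hpk hne
          | cons a k' => simp
        rw [pvNormGo, hm]
        dsimp only
        rw [hdrop, pvMsub_cons_some hf, ih _ (by simp at h ⊢; omega)]
      | none =>
        rw [hf, Option.map_none] at hm
        rw [pvNormGo, hm]
        dsimp only
        rw [pvMsub_cons_none hf, ih t (by simp at h; omega)]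

lemma pvSub_eq_msub (cs : List Char) : pvSub cs = pvMsub pvRules cs :=
  pvNormGo_spec cs.length cs le_rfl

-- PySem.Chars.replace equals pvRep for a nonempty key
lemma go_spec (k v : List Char) (hk : k ≠ []) :
    ∀ fuel l acc, l.length ≤ fuel →
      PySem.Chars.replace.go k v fuel l acc = acc.reverse ++ pvRep k v l := by
  intro fuel
  induction fuel with
  | zero =>
    intro l acc h
    have : l = [] := List.eq_nil_of_length_eq_zero (Nat.le_zero.mp h)
    subst this; rw [PySem.Chars.replace.go.eq_def]; simp [pvRep_nil]
  | succ n ih =>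
    intro l acc h
    match l with
    | [] => rw [PySem.Chars.replace.go.eq_def]; simp [pvRep_nil]
    | c :: t =>
      rw [PySem.Chars.replace.go.eq_def]
      simp only []
      by_cases hp : k.isPrefixOf (c :: t) = true
      · rw [if_pos hp]
        have hd : List.drop k.length (c :: t) = t.drop (k.length - 1) := by
          match k, hk with
          | a :: k', _ => simp
        rw [hd, ih _ _ (by simp at h ⊢; omega)]
        rw [pvRep_cons_pos v hp]
        simp
      · rw [if_neg hp, ih _ _ (by simp at h ⊢; omega)]
        rw [pvRep_cons_neg v hp]
        simp

lemma replace_eq_pvRep (k v s : List Char) (hk : k ≠ []) :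
    PySem.Chars.replace s k v = pvRep k v s := by
  rw [PySem.Chars.replace]
  rw [if_neg (by simp [List.isEmpty_iff, hk])]
  simpa using go_spec k v hk s.length s [] le_rfl

-- two prefixes of the same list are comparable; a key matching s ++ m is comparable with s
lemma key_cmp {k s m : List Char} (h : k <+: s ++ m) : k <+: s ∨ s <+: k :=
  List.prefix_or_prefix_of_prefix h (List.prefix_append s m)

-- a replace pass slides over a block none of whose suffixes interacts with the key
lemma pvRep_append (k v a : List Char)
    (h : ∀ s, s <:+ a → s ≠ [] → ¬ k <+: s ∧ ¬ s <+: k) :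
    ∀ m, pvRep k v (a ++ m) = a ++ pvRep k v m := by
  induction a with
  | nil => simp
  | cons x a' ih =>
    intro m
    have hnp : ¬ k.isPrefixOf (x :: (a' ++ m)) = true := by
      rw [List.isPrefixOf_iff_prefix]
      intro hkp
      have := key_cmp (show k <+: (x :: a') ++ m by simpa using hkp)
      have h2 := h (x :: a') List.suffix_rfl (by simp)
      tauto
    rw [show x :: a' ++ m = x :: (a' ++ m) from rfl, pvRep_cons_neg v hnp]
    rw [ih (fun s hs hne => h s (hs.trans (List.suffix_cons x a')) hne) m]
    rfl

-- pvRep fires immediately on its own key at the head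
lemma pvRep_head (k v : List Char) (hk : k ≠ []) (m : List Char) :
    pvRep k v (k ++ m) = v ++ pvRep k v m := by
  match k, hk with
  | a :: k', _ =>
    rw [show (a :: k') ++ m = a :: (k' ++ m) from rfl,
        pvRep_cons_pos v (List.isPrefixOf_iff_prefix.mpr (by simp))]
    simp

-- the one-pass multi-replace slides over a block no key can touch
lemma pvMsub_append (kv : List (List Char × List Char)) (a : List Char)
    (h : ∀ p ∈ kv, ∀ s, s <:+ a → s ≠ [] → ¬ p.1 <+: s ∧ ¬ s <+: p.1) :
    ∀ m, pvMsub kv (a ++ m) = a ++ pvMsub kv m := by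
  induction a with
  | nil => simp
  | cons x a' ih =>
    intro m
    have hnone : kv.find? (fun p => p.1.isPrefixOf (x :: (a' ++ m))) = none := by
      rw [List.find?_eq_none]
      intro p hp
      simp only [Bool.not_eq_true]
      rw [← Bool.not_eq_true, List.isPrefixOf_iff_prefix]
      intro hkp
      have := key_cmp (show p.1 <+: (x :: a') ++ m by simpa using hkp)
      have h2 := h p hp (x :: a') List.suffix_rfl (by simp)
      tauto
    rw [show x :: a' ++ m = x :: (a' ++ m) from rfl, pvMsub_cons_none hnone]
    rw [ih (fun p hp s hs hne => h p hp s (hs.trans (List.suffix_cons x a')) hne) m]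
    rfl

-- finite facts about the concrete rule table
lemma pvIdx : ∀ j < 8, pvRules[j]? = some (pvRules[j]!) := by decide
lemma pvKeyJNe : ∀ j < 8, ((pvRules[j]!).1 : List Char) ≠ [] := by decide
-- no suffix of a replacement value interacts with any key
lemma pvDF2 : ∀ j < 8, ∀ p ∈ pvRules.take j, ∀ s ∈ p.2.tails,
    s = [] ∨ (¬ ((pvRules[j]!).1 <+: s) ∧ ¬ (s <+: (pvRules[j]!).1)) := by decide
-- no suffix of a key interacts with another key
lemma pvDF3 : ∀ j < 8, ∀ p ∈ pvRules.take j, ∀ s ∈ ((pvRules[j]!).1).tails,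
    s = [] ∨ (¬ (p.1 <+: s) ∧ ¬ (s <+: p.1)) := by decide
-- the ONLY suffix of a key comparable with an earlier value: 'S' of "EXEC CICS" vs "SIGNED_…"
lemma pvDF4 : ∀ j < 8, ∀ p ∈ pvRules.take j, ∀ s ∈ ((pvRules[j]!).1).tails,
    (s = [] ∨ (¬ s <+: p.2 ∧ ¬ p.2 <+: s)) ∨
    (j = 5 ∧ p.1 = "PIC S9(".toList ∧ p.2 = "SIGNED_NUMERIC_FIELD ".toList ∧ s = ['S']) := by decide

-- if a nonempty suffix w of key j prefixes the processed text but not the original text, the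
-- only possibility is the "EXEC CICS" / "SIGNED_NUMERIC_FIELD " chain: w ends in 'S' produced
-- by an original "PIC S9(" occurrence
lemma pvCreate : ∀ (n : Nat) (t : List Char), t.length ≤ n → ∀ j < 8, ∀ (w : List Char),
    w <:+ (pvRules[j]!).1 → w ≠ [] → ¬ w <+: t → w <+: pvMsub (pvRules.take j) t →
    j = 5 ∧ ∃ w', w = w' ++ ['S'] ∧ (w' ++ "PIC S9(".toList) <+: t := by
  intro n
  induction n with
  | zero =>
    intro t ht j hj w hwsfx hwne hwt hwp
    have : t = [] := List.eq_nil_of_length_eq_zero (Nat.le_zero.mp ht)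
    subst this
    rw [pvMsub_nil] at hwp
    exact absurd (List.prefix_nil.mp hwp) hwne
  | succ n ih =>
    intro t ht j hj w hwsfx hwne hwt hwp
    match t with
    | [] =>
      rw [pvMsub_nil] at hwp
      exact absurd (List.prefix_nil.mp hwp) hwne
    | c :: t2 =>
      cases hf : (pvRules.take j).find? (fun p => p.1.isPrefixOf (c :: t2)) with
      | some p =>
        have hpmem : p ∈ pvRules.take j := List.mem_of_find?_eq_some hf
        have hppre : p.1 <+: c :: t2 := by
          have := List.find?_some hf
          exact List.isPrefixOf_iff_prefix.mp (by simpa using this)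
        rw [pvMsub_cons_some hf] at hwp
        rcases key_cmp hwp with hcmp | hcmp <;>
        · rcases pvDF4 j hj p hpmem w ((List.mem_tails _ _).mpr hwsfx) with (h0 | ⟨h1, h2⟩) | ⟨hj5, hp1, hp2, hwS⟩
          · exact absurd h0 hwne
          · tauto
          · refine ⟨hj5, [], by simpa using hwS, by rw [← hp1]; simpa using hppre⟩
      | none =>
        rw [pvMsub_cons_none hf] at hwp
        match w, hwne with
        | a :: w2, _ =>
          rcases List.cons_prefix_cons.mp hwp with ⟨hac, hw2p⟩
          by_cases hw2 : w2 = []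
          · subst hw2
            exact absurd (List.cons_prefix_cons.mpr ⟨hac, List.nil_prefix⟩) hwt
          · have hw2t : ¬ w2 <+: t2 := fun hc => hwt (List.cons_prefix_cons.mpr ⟨hac, hc⟩)
            have hw2sfx : w2 <:+ (pvRules[j]!).1 := (List.suffix_cons a w2).trans hwsfx
            obtain ⟨hj5, w2', hw2eq, hpre⟩ :=
              ih t2 (by simp at ht; omega) j hj w2 hw2sfx hw2 hw2t hw2p
            exact ⟨hj5, a :: w2', by rw [hw2eq]; rfl,
              List.cons_prefix_cons.mpr ⟨hac, hpre⟩⟩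

-- prefix arithmetic: peeling a matched key off the front
lemma pvPeel {k r : List Char} {c : Char} {t : List Char} (hk : k ≠ [])
    (h : k ++ r = c :: t) : r = t.drop (k.length - 1) := by
  match k, hk with
  | a :: k', _ =>
    have h' : a :: (k' ++ r) = c :: t := by simpa using h
    injection h' with h1 h2
    rw [← h2]
    simp

-- no phantom key-j match can appear at the head of the processed text unless the line starts
-- with the chaining pattern pvBad (and then only for rule 5, "EXEC CICS")
lemma pvNoGhost (j : Nat) (hj : j < 8) (c : Char) (t : List Char)
    (hkp : ¬ (pvRules[j]!).1 <+: c :: t)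
    (hbp : j = 5 → ¬ pvBad <+: c :: t) :
    ¬ (pvRules[j]!).1 <+: c :: pvMsub (pvRules.take j) t := by
  intro habs
  match hkj : (pvRules[j]!).1, pvKeyJNe j hj with
  | a :: w, _ =>
    rw [hkj] at habs hkp
    rcases List.cons_prefix_cons.mp habs with ⟨hac, hwp⟩
    by_cases hw : w = []
    · subst hw
      exact hkp (List.cons_prefix_cons.mpr ⟨hac, List.nil_prefix⟩)
    · have hwt : ¬ w <+: t := fun hc => hkp (List.cons_prefix_cons.mpr ⟨hac, hc⟩)
      have hwsfx : w <:+ (pvRules[j]!).1 := by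
        rw [hkj]; exact List.suffix_cons a w
      obtain ⟨hj5, w', hweq, hpre⟩ :=
        pvCreate t.length t le_rfl j hj w hwsfx hw hwt hwp
      -- reconstruct the literal bad substring at the head of the original line
      subst hj5
      have hkj' : (a :: w' : List Char) ++ ['S'] = "EXEC CICS".toList := by
        have h5 : (pvRules[5]!).1 = "EXEC CICS".toList := by decide
        rw [h5] at hkj
        rw [hweq] at hkj
        exact hkj.symm
      have hcw : (a :: w' : List Char) = "EXEC CIC".toList := by
        have := congrArg List.dropLast hkj'
        rwa [List.dropLast_concat, show ("EXEC CICS".toList).dropLast = "EXEC CIC".toList by decide] at this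
      have hbadpre : pvBad <+: c :: t := by
        have hb : pvBad = (a :: w') ++ "PIC S9(".toList := by
          rw [hcw]; decide
        rw [hb]
        exact List.cons_prefix_cons.mpr ⟨hac, hpre⟩
      exact hbp rfl hbadpre

-- one stage: applying replace pass j to the one-pass result over the first j rules gives the
-- one-pass result over the first j+1 rules (for rule 5 only outside the chaining region)
lemma pvStage : ∀ (n : Nat) (l : List Char), l.length ≤ n → ∀ j, (hj : j < 8) →
    (j = 5 → ¬ pvBad <:+: l) →
    pvRep (pvRules[j]!).1 (pvRules[j]!).2 (pvMsub (pvRules.take j) l) =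
      pvMsub (pvRules.take (j+1)) l := by
  intro n
  induction n with
  | zero =>
    intro l hl j hj hbad
    have : l = [] := List.eq_nil_of_length_eq_zero (Nat.le_zero.mp hl)
    subst this; rw [pvMsub_nil, pvMsub_nil, pvRep_nil]
  | succ n ih =>
    intro l hl j hj hbad
    match l with
    | [] => rw [pvMsub_nil, pvMsub_nil, pvRep_nil]
    | c :: t =>
      have htake : pvRules.take (j+1) = pvRules.take j ++ [pvRules[j]!] := by
        rw [List.take_add_one, pvIdx j hj]; rfl
      have hDF2' : ∀ p ∈ pvRules.take j, ∀ s, s <:+ p.2 → s ≠ [] →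
          ¬ ((pvRules[j]!).1 <+: s) ∧ ¬ (s <+: (pvRules[j]!).1) := by
        intro p hp s hs hne
        rcases pvDF2 j hj p hp s ((List.mem_tails _ _).mpr hs) with h0 | h1
        · exact absurd h0 hne
        · exact h1
      cases hf : (pvRules.take j).find? (fun p => p.1.isPrefixOf (c :: t)) with
      | some p =>
        have hf1 : (pvRules.take (j+1)).find? (fun p => p.1.isPrefixOf (c :: t)) = some p := by
          rw [htake, List.find?_append, hf]; rfl
        have hpmem : p ∈ pvRules.take j := List.mem_of_find?_eq_some hf
        rw [pvMsub_cons_some hf, pvMsub_cons_some hf1,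
            pvRep_append _ _ _ (hDF2' p hpmem)]
        congr 1
        have hsfx : (t.drop (p.1.length - 1)) <:+ c :: t :=
          (List.drop_suffix _ _).trans (List.suffix_cons c t)
        exact ih _ (by simp [List.length_drop] at hl ⊢; omega) j hj
          (fun h5 hc => hbad h5 (hc.trans hsfx.isInfix))
      | none =>
        by_cases hkp : (pvRules[j]!).1.isPrefixOf (c :: t) = true
        · -- rule j fires at the head
          have hf1 : (pvRules.take (j+1)).find? (fun p => p.1.isPrefixOf (c :: t)) =
              some (pvRules[j]!) := by
            rw [htake, List.find?_append, hf, Option.none_or]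
            exact List.find?_cons_of_pos (by exact hkp)
          obtain ⟨r, hr⟩ := List.isPrefixOf_iff_prefix.mp hkp
          have hkne := pvKeyJNe j hj
          have hrd : r = t.drop ((pvRules[j]!).1.length - 1) := pvPeel hkne hr
          have hrsfx : r <:+ c :: t := ⟨(pvRules[j]!).1, hr⟩
          have hDF3' : ∀ p ∈ pvRules.take j, ∀ s, s <:+ (pvRules[j]!).1 → s ≠ [] →
              ¬ (p.1 <+: s) ∧ ¬ (s <+: p.1) := by
            intro p hp s hs hne
            rcases pvDF3 j hj p hp s ((List.mem_tails _ _).mpr hs) with h0 | h1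
            · exact absurd h0 hne
            · exact h1
          rw [pvMsub_cons_some hf1, ← hrd, ← hr,
              pvMsub_append (pvRules.take j) _ hDF3' r,
              pvRep_head _ _ hkne]
          congr 1
          have hlen : r.length ≤ n := by
            have h1 : (pvRules[j]!).1.length + r.length = t.length + 1 := by
              have := congrArg List.length hr
              rwa [List.length_append, List.length_cons] at this
            have h2 : 0 < (pvRules[j]!).1.length := List.length_pos_of_ne_nil hkne
            have h3 : t.length + 1 ≤ n + 1 := by simpa using hl
            omega
          exact ih r hlen j hj (fun h5 hc => hbad h5 (hc.trans hrsfx.isInfix))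
        · -- no rule fires at the head
          have hf1 : (pvRules.take (j+1)).find? (fun p => p.1.isPrefixOf (c :: t)) = none := by
            rw [htake, List.find?_append, hf, Option.none_or,
                List.find?_cons_of_neg (by exact hkp), List.find?_nil]
          rw [pvMsub_cons_none hf, pvMsub_cons_none hf1]
          have hnKM : ¬ (pvRules[j]!).1.isPrefixOf (c :: pvMsub (pvRules.take j) t) = true := by
            rw [List.isPrefixOf_iff_prefix]
            exact pvNoGhost j hj c t (by rwa [List.isPrefixOf_iff_prefix] at hkp)
              (fun h5 hb => hbad h5 hb.isInfix)
          rw [pvRep_cons_neg _ hnKM]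
          congr 1
          exact ih t (by simp at hl; omega) j hj
            (fun h5 hc => hbad h5 (hc.trans (List.suffix_cons c t).isInfix))

-- chaining the stages: the fold of the first j replace passes is the one-pass result
lemma pvChain : ∀ j, j ≤ 8 → ∀ l, (6 ≤ j → ¬ pvBad <:+: l) →
    (pvRules.take j).foldl (fun s p => pvRep p.1 p.2 s) l = pvMsub (pvRules.take j) l := by
  intro j
  induction j with
  | zero => intro _ l _; simpa using (pvMsub_no_keys l).symm
  | succ j ih =>
    intro hj l hbad
    have hj8 : j < 8 := by omega
    have htake : pvRules.take (j+1) = pvRules.take j ++ [pvRules[j]!] := by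
      rw [List.take_add_one, pvIdx j hj8]; rfl
    rw [htake, List.foldl_append, ih (by omega) l (fun h6 => hbad (by omega)), ← htake]
    exact pvStage l.length l le_rfl j hj8 (fun h5 => hbad (by omega))

-- fold of PySem replaces = fold of pvRep (all keys nonempty)
lemma pvFoldRep : ∀ (kv : List (List Char × List Char)), (∀ p ∈ kv, p.1 ≠ []) → ∀ l,
    kv.foldl (fun s p => PySem.Chars.replace s p.1 p.2) l =
      kv.foldl (fun s p => pvRep p.1 p.2 s) l := by
  intro kv
  induction kv with
  | nil => intro _ l; rfl
  | cons p kv ih =>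
    intro h l
    simp only [List.foldl_cons]
    rw [replace_eq_pvRep p.1 p.2 l (h p List.mem_cons_self), ih (fun q hq => h q (List.mem_cons_of_mem p hq))]

-- per line: A's eight sequential passes agree with B's single scan
lemma pvLine (cs : List Char) (h : ¬ pvBad <:+: cs) :
    pvReplC.foldl (fun s p => PySem.Chars.replace s p.1 p.2) cs = pvSub cs := by
  have h1 : pvReplC = pvRules := rfl
  have h8 : pvRules.take 8 = pvRules := rfl
  rw [h1, pvFoldRep pvRules (by decide) cs, pvSub_eq_msub, ← h8]
  exact pvChain 8 le_rfl cs (fun _ => h)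

-- the accumulator splits off the front of the per-line fold
lemma pvFoldAcc (g : List Char → List Char) : ∀ (ls : List (List Char)) (acc : List (List Char)),
    ls.foldl (fun acc line =>
      let l := PySem.Chars.strip line
      if l = [] ∨ PySem.Chars.startswith l "*".toList = true then acc
      else acc ++ [g (PySem.Chars.upper l)]) acc =
    acc ++ ls.foldl (fun acc line =>
      let l := PySem.Chars.strip line
      if l = [] ∨ PySem.Chars.startswith l "*".toList = true then acc
      else acc ++ [g (PySem.Chars.upper l)]) [] := by
  intro ls
  induction ls with
  | nil => intro acc; simp
  | cons ln ls ih =>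
    intro acc
    simp only [List.foldl_cons]
    by_cases hc : PySem.Chars.strip ln = [] ∨ PySem.Chars.startswith (PySem.Chars.strip ln) "*".toList = true
    · simp only [if_pos hc]
      exact ih acc
    · simp only [if_neg hc]
      rw [ih (acc ++ [g (PySem.Chars.upper (PySem.Chars.strip ln))]),
          ih ([] ++ [g (PySem.Chars.upper (PySem.Chars.strip ln))])]
      simp

-- B-shaped fold step as a named function (proof plumbing only; defeq to the lambda in pvFoldLines)
def pvStepB (acc : List (List Char)) (raw : List Char) : List (List Char) :=
  let l := PySem.Chars.strip raw
  if l = [] ∨ PySem.Chars.startswith l "*".toList = true then acc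
  else acc ++ [pvSub (PySem.Chars.upper l)]

lemma pvStepB_skip {raw : List Char} (acc : List (List Char))
    (h : PySem.Chars.strip raw = [] ∨ PySem.Chars.startswith (PySem.Chars.strip raw) "*".toList = true) :
    pvStepB acc raw = acc := by
  unfold pvStepB; rw [if_pos h]

lemma pvStepB_keep {raw : List Char} (acc : List (List Char))
    (h : ¬ (PySem.Chars.strip raw = [] ∨ PySem.Chars.startswith (PySem.Chars.strip raw) "*".toList = true)) :
    pvStepB acc raw = acc ++ [pvSub (PySem.Chars.upper (PySem.Chars.strip raw))] := by
  unfold pvStepB; rw [if_neg h]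

lemma pvFoldAccB : ∀ (ls : List (List Char)) (acc : List (List Char)),
    ls.foldl pvStepB acc = acc ++ ls.foldl pvStepB [] := by
  intro ls
  induction ls with
  | nil => intro acc; simp
  | cons ln ls ih =>
    intro acc
    rw [List.foldl_cons, List.foldl_cons]
    by_cases hc : PySem.Chars.strip ln = [] ∨ PySem.Chars.startswith (PySem.Chars.strip ln) "*".toList = true
    · rw [pvStepB_skip acc hc, pvStepB_skip [] hc]
      exact ih acc
    · rw [pvStepB_keep acc hc, pvStepB_keep [] hc, ih (acc ++ _), ih ([] ++ _)]
      simp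

-- B's staged filter/map pipeline equals the B-shaped fold with pvSub as the per-line normalizer
lemma pvAltForm : ∀ (ls : List (List Char)),
    (((ls.map PySem.Chars.strip).filter
        (fun l => !l.isEmpty && !(PySem.Chars.startswith l "*".toList))).map PySem.Chars.upper).map pvSub =
    ls.foldl pvStepB [] := by
  intro ls
  induction ls with
  | nil => rfl
  | cons ln ls ih =>
    rw [List.map_cons, List.filter_cons, List.foldl_cons]
    by_cases hc : PySem.Chars.strip ln = [] ∨ PySem.Chars.startswith (PySem.Chars.strip ln) "*".toList = true
    · have hb : (!(PySem.Chars.strip ln).isEmpty && !(PySem.Chars.startswith (PySem.Chars.strip ln) "*".toList)) = false := by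
        rcases hc with h | h
        · rw [h]; rfl
        · rw [h]; simp
      rw [hb, pvStepB_skip [] hc]
      simp only [Bool.false_eq_true, if_false]
      exact ih
    · rw [not_or] at hc
      have h1 : (PySem.Chars.strip ln).isEmpty = false := by
        rw [List.isEmpty_eq_false_iff]; exact hc.1
      have h2 : PySem.Chars.startswith (PySem.Chars.strip ln) "*".toList = false :=
        eq_false_of_ne_true hc.2
      have hb : (!(PySem.Chars.strip ln).isEmpty && !(PySem.Chars.startswith (PySem.Chars.strip ln) "*".toList)) = true := by
        rw [h1, h2]; rfl
      rw [hb, pvStepB_keep [] (not_or.mpr hc), pvFoldAccB ls ([] ++ _), ← ih]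
      simp

-- ========== machinery for Claim_exact: A and B really differ everywhere inside D_ ==========

-- the two blocks at a chain site: A's output carries pvQ where B's carries pvP
def pvP : List Char := "EXEC CICS".toList
def pvQ : List Char := "TRANSACTION ".toList

-- finite facts for the tight proof
lemma pvBadKeySfx : ∀ p ∈ pvRules, (∀ σ ∈ p.1.tails, σ ≠ [] → ¬ σ <+: pvBad) ∧ p.1.length < pvBad.length := by decide
lemma pvCopyFact : ∀ j < 7, ∀ σ ∈ ("EXEC CIC".toList).tails, σ ≠ [] → ∀ p ∈ pvRules.take j,
    ¬ p.1 <+: (σ ++ "PIC S9(".toList) ∧ ¬ (σ ++ "PIC S9(".toList) <+: p.1 := by decide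
lemma pvPicCmp : ∀ j < 7, ∀ p ∈ pvRules.take j, p ≠ ("PIC S9(".toList, "SIGNED_NUMERIC_FIELD ".toList) →
    ¬ p.1 <+: "PIC S9(".toList ∧ ¬ ("PIC S9(".toList : List Char) <+: p.1 := by decide
-- no suffix of k7/k8 interacts with the blocks, and the blocks are inert for k7/k8
lemma pvPairFact6 :
    (∀ σ ∈ pvP.tails, σ ≠ [] → ¬ (pvRules[6]!).1 <+: σ ∧ ¬ σ <+: (pvRules[6]!).1) ∧
    (∀ σ ∈ pvQ.tails, σ ≠ [] → ¬ (pvRules[6]!).1 <+: σ ∧ ¬ σ <+: (pvRules[6]!).1) ∧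
    (∀ σ ∈ ((pvRules[6]!).1).tails, σ ≠ [] → (¬ σ <+: pvP ∧ ¬ pvP <+: σ) ∧ (¬ σ <+: pvQ ∧ ¬ pvQ <+: σ)) := by decide
lemma pvPairFact7 :
    (∀ σ ∈ pvP.tails, σ ≠ [] → ¬ (pvRules[7]!).1 <+: σ ∧ ¬ σ <+: (pvRules[7]!).1) ∧
    (∀ σ ∈ pvQ.tails, σ ≠ [] → ¬ (pvRules[7]!).1 <+: σ ∧ ¬ σ <+: (pvRules[7]!).1) ∧
    (∀ σ ∈ ((pvRules[7]!).1).tails, σ ≠ [] → (¬ σ <+: pvP ∧ ¬ pvP <+: σ) ∧ (¬ σ <+: pvQ ∧ ¬ pvQ <+: σ)) := by decide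
lemma pvInertI : ∀ σ ∈ ("IGNED_NUMERIC_FIELD ".toList).tails, σ ≠ [] → ¬ pvP <+: σ ∧ ¬ σ <+: pvP := by decide
lemma pvP5 : ((pvRules[5]!).1 = pvP) ∧ ((pvRules[5]!).2 = pvQ) := by decide

-- an occurrence of pvBad cannot start inside a matched key: it slides past it
lemma pvInfixSkip {k r : List Char} (hlen : k.length < pvBad.length)
    (hks : ∀ σ, σ <:+ k → σ ≠ [] → ¬ σ <+: pvBad)
    (h : pvBad <:+: (k ++ r)) : pvBad <:+: r := by
  obtain ⟨a, b, hab⟩ := h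
  have hal : a <+: k ++ r := ⟨pvBad ++ b, by rw [← List.append_assoc]; exact hab⟩
  rcases List.prefix_or_prefix_of_prefix hal (List.prefix_append k r) with hak | hka
  · -- a inside k or k inside a
    obtain ⟨σ, hσ⟩ := hak
    by_cases hσe : σ = []
    · subst hσe
      rw [List.append_nil] at hσ
      subst hσ
      exact ⟨[], b, by have := List.append_cancel_left (hab.symm.trans (by rw [List.append_assoc])); simpa using this.symm⟩
    · exfalso
      have hbadσ : pvBad ++ b = σ ++ r := by
        have : a ++ (pvBad ++ b) = a ++ (σ ++ r) := by
          rw [← List.append_assoc, hab, ← hσ, List.append_assoc]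
        exact List.append_cancel_left this
      have hcmp : σ <+: pvBad ∨ pvBad <+: σ :=
        List.prefix_or_prefix_of_prefix (⟨r, hbadσ.symm⟩) (List.prefix_append pvBad b)
      have hσlen : σ.length ≤ k.length := by
        have := congrArg List.length hσ; simp at this; omega
      rcases hcmp with h1 | h1
      · exact hks σ ⟨a, hσ⟩ hσe h1
      · have := h1.length_le; omega
  · -- k <+: a
    obtain ⟨a', ha'⟩ := hka
    refine ⟨a', b, ?_⟩
    have : k ++ (a' ++ pvBad ++ b) = k ++ r := by
      rw [show k ++ (a' ++ pvBad ++ b) = (k ++ a') ++ pvBad ++ b by simp [List.append_assoc], ha', hab]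
    exact List.append_cancel_left this

-- a pvBad occurrence in c :: t that is not a prefix lies in t
lemma pvBadTail {c : Char} {t : List Char} (h : pvBad <:+: (c :: t)) (hp : ¬ pvBad <+: (c :: t)) :
    pvBad <:+: t := by
  obtain ⟨a, b, hab⟩ := h
  match a with
  | [] => exact absurd ⟨b, by simpa using hab⟩ hp
  | a0 :: a' =>
    have h2 : a' ++ (pvBad ++ b) = t := (show a0 = c ∧ a' ++ (pvBad ++ b) = t by simpa using hab).2
    exact ⟨a', b, by rw [← List.append_assoc] at h2; exact h2⟩

-- the one-pass scan copies a block that cannot host a key start, given its right context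
lemma pvMsubCopy (kv : List (List Char × List Char)) (a b : List Char)
    (h : ∀ σ, σ <:+ a → σ ≠ [] → ∀ p ∈ kv, ¬ p.1 <+: (σ ++ b) ∧ ¬ (σ ++ b) <+: p.1) :
    ∀ m, pvMsub kv (a ++ (b ++ m)) = a ++ pvMsub kv (b ++ m) := by
  induction a with
  | nil => simp
  | cons x a' ih =>
    intro m
    have hnone : kv.find? (fun p => p.1.isPrefixOf (x :: (a' ++ (b ++ m)))) = none := by
      rw [List.find?_eq_none]
      intro p hp
      simp only [Bool.not_eq_true]
      rw [← Bool.not_eq_true, List.isPrefixOf_iff_prefix]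
      intro hkp
      have hkp' : p.1 <+: ((x :: a') ++ b) ++ m := by simpa [List.append_assoc] using hkp
      have := key_cmp hkp'
      have h2 := h (x :: a') List.suffix_rfl (by simp) p hp
      tauto
    rw [show x :: a' ++ (b ++ m) = x :: (a' ++ (b ++ m)) from rfl, pvMsub_cons_none hnone]
    rw [ih (fun σ hσ hne => h σ (hσ.trans (List.suffix_cons x a')) hne) m]
    rfl

-- the scan fires rule 3 on "PIC S9(" whatever follows
lemma pvFindPicAux (m : List Char) : ∀ (kv : List (List Char × List Char)),
    (∀ p ∈ kv, p ≠ ("PIC S9(".toList, "SIGNED_NUMERIC_FIELD ".toList) →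
      ¬ (p.1.isPrefixOf ("PIC S9(".toList ++ m) = true)) →
    kv.find? (fun p => p.1.isPrefixOf ("PIC S9(".toList ++ m)) =
      if ("PIC S9(".toList, "SIGNED_NUMERIC_FIELD ".toList) ∈ kv then
        some ("PIC S9(".toList, "SIGNED_NUMERIC_FIELD ".toList) else none := by
  have hpos : (("PIC S9(".toList : List Char)).isPrefixOf ("PIC S9(".toList ++ m) = true := by
    rw [List.isPrefixOf_iff_prefix]; exact List.prefix_append _ _
  intro kv
  induction kv with
  | nil => intro _; rfl
  | cons q kvt ihkv =>
    intro hstep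
    by_cases hq : q = ("PIC S9(".toList, "SIGNED_NUMERIC_FIELD ".toList)
    · subst hq
      rw [List.find?_cons]
      simp
    · have hf : q.1.isPrefixOf ("PIC S9(".toList ++ m) = false :=
        Bool.eq_false_iff.mpr (hstep q List.mem_cons_self hq)
      rw [List.find?_cons, hf, ihkv (fun p hp => hstep p (List.mem_cons_of_mem q hp))]
      have hne : ¬ ((['P','I','C',' ','S','9','('], ['S','I','G','N','E','D','_','N','U','M','E','R','I','C','_','F','I','E','L','D',' ']) = q) :=
        fun h => hq h.symm
      simp [List.mem_cons, hne]

lemma pvFindPic (j : Nat) (hj : j < 7) (m : List Char) :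
    (pvRules.take j).find? (fun p => p.1.isPrefixOf ("PIC S9(".toList ++ m)) =
      if ("PIC S9(".toList, "SIGNED_NUMERIC_FIELD ".toList) ∈ pvRules.take j then
        some ("PIC S9(".toList, "SIGNED_NUMERIC_FIELD ".toList) else none := by
  apply pvFindPicAux
  intro p hp hne hmab
  rw [List.isPrefixOf_iff_prefix] at hmab
  have := key_cmp hmab
  have h2 := pvPicCmp j hj p hp hne
  tauto

lemma pvMsubPic (j : Nat) (hj : j = 5 ∨ j = 6) (m : List Char) :
    pvMsub (pvRules.take j) ("PIC S9(".toList ++ m) =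
      "SIGNED_NUMERIC_FIELD ".toList ++ pvMsub (pvRules.take j) m := by
  have hj7 : j < 7 := by omega
  have hmem : ("PIC S9(".toList, "SIGNED_NUMERIC_FIELD ".toList) ∈ pvRules.take j := by
    rcases hj with h | h <;> subst h <;> decide
  have hf := pvFindPic j hj7 m
  rw [if_pos hmem] at hf
  rw [show ("PIC S9(".toList ++ m) = 'P' :: ("IC S9(".toList ++ m) from rfl] at hf ⊢
  rw [pvMsub_cons_some hf]
  have hd : ("IC S9(".toList ++ m).drop ((("PIC S9(".toList : List Char), ("SIGNED_NUMERIC_FIELD ".toList : List Char)).1.length - 1) = m := by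
    rw [show ((("PIC S9(".toList : List Char), ("SIGNED_NUMERIC_FIELD ".toList : List Char)).1.length - 1) = ("IC S9(".toList : List Char).length from rfl]
    exact List.drop_left
  rw [hd]

-- a probe for key k at the head of u ++ (B ++ x) is decided inside u, for an inert block B
lemma pvProbe (k B : List Char) (hs : ∀ σ, σ <:+ k → σ ≠ [] → ¬ σ <+: B ∧ ¬ B <+: σ)
    (u x : List Char) : k <+: u ++ (B ++ x) ↔ k <+: u := by
  constructor
  · intro h
    rcases List.prefix_or_prefix_of_prefix h (List.prefix_append u (B ++ x)) with h1 | h1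
    · exact h1
    · obtain ⟨σ, hσ⟩ := h1
      by_cases hσe : σ = []
      · subst hσe; rw [List.append_nil] at hσ; rw [← hσ]
      · exfalso
        have hσp : σ <+: B ++ x := by
          have : u ++ σ <+: u ++ (B ++ x) := by rwa [hσ]
          obtain ⟨z, hz⟩ := this
          exact ⟨z, List.append_cancel_left (by rwa [← List.append_assoc])⟩
        have := key_cmp hσp
        have h2 := hs σ ⟨u, hσ⟩ hσe
        tauto
  · intro h; exact h.trans (List.prefix_append u (B ++ x))

-- one replace pass rewrites the common part of the two sides identically and keeps the blocks
lemma pvRepPair (k v : List Char) (hk : k ≠ [])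
    (hPi : ∀ σ, σ <:+ pvP → σ ≠ [] → ¬ k <+: σ ∧ ¬ σ <+: k)
    (hQi : ∀ σ, σ <:+ pvQ → σ ≠ [] → ¬ k <+: σ ∧ ¬ σ <+: k)
    (hsP : ∀ σ, σ <:+ k → σ ≠ [] → ¬ σ <+: pvP ∧ ¬ pvP <+: σ)
    (hsQ : ∀ σ, σ <:+ k → σ ≠ [] → ¬ σ <+: pvQ ∧ ¬ pvQ <+: σ) :
    ∀ (n : Nat) (u : List Char), u.length ≤ n → ∀ x y, ∃ ρ,
      pvRep k v (u ++ (pvQ ++ x)) = ρ ++ (pvQ ++ pvRep k v x) ∧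
      pvRep k v (u ++ (pvP ++ y)) = ρ ++ (pvP ++ pvRep k v y) := by
  intro n
  induction n with
  | zero =>
    intro u hu x y
    have : u = [] := List.eq_nil_of_length_eq_zero (Nat.le_zero.mp hu)
    subst this
    exact ⟨[], by simpa using pvRep_append k v pvQ hQi x, by simpa using pvRep_append k v pvP hPi y⟩
  | succ n ih =>
    intro u hu x y
    match u with
    | [] =>
      exact ⟨[], by simpa using pvRep_append k v pvQ hQi x, by simpa using pvRep_append k v pvP hPi y⟩
    | c :: u' =>
      by_cases hm : k <+: c :: u'
      · obtain ⟨u'', hu''⟩ := hm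
        have hQ : (c :: u') ++ (pvQ ++ x) = k ++ (u'' ++ (pvQ ++ x)) := by
          rw [← hu'', List.append_assoc]
        have hP : (c :: u') ++ (pvP ++ y) = k ++ (u'' ++ (pvP ++ y)) := by
          rw [← hu'', List.append_assoc]
        have hlen : u''.length ≤ n := by
          have := congrArg List.length hu''
          have hk1 : 0 < k.length := List.length_pos_of_ne_nil hk
          simp at this hu; omega
        obtain ⟨ρ, hρQ, hρP⟩ := ih u'' hlen x y
        exact ⟨v ++ ρ, by rw [hQ, pvRep_head k v hk, hρQ, List.append_assoc],
          by rw [hP, pvRep_head k v hk, hρP, List.append_assoc]⟩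
      · have hnQ : ¬ k.isPrefixOf ((c :: u') ++ (pvQ ++ x)) = true := by
          rw [List.isPrefixOf_iff_prefix, pvProbe k pvQ hsQ]
          exact hm
        have hnP : ¬ k.isPrefixOf ((c :: u') ++ (pvP ++ y)) = true := by
          rw [List.isPrefixOf_iff_prefix, pvProbe k pvP hsP]
          exact hm
        obtain ⟨ρ, hρQ, hρP⟩ := ih u' (by simp at hu; omega) x y
        have hnQ' : ¬ k.isPrefixOf (c :: (u' ++ (pvQ ++ x))) = true := hnQ
        have hnP' : ¬ k.isPrefixOf (c :: (u' ++ (pvP ++ y))) = true := hnP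
        refine ⟨c :: ρ, ?_, ?_⟩
        · show pvRep k v (c :: (u' ++ (pvQ ++ x))) = (c :: ρ) ++ (pvQ ++ pvRep k v x)
          rw [pvRep_cons_neg v hnQ', hρQ]; rfl
        · show pvRep k v (c :: (u' ++ (pvP ++ y))) = (c :: ρ) ++ (pvP ++ pvRep k v y)
          rw [pvRep_cons_neg v hnP', hρP]; rfl

-- keys in the first five rules are nonempty
lemma pvTakeKeyNe5 : ∀ p ∈ pvRules.take 5, p.1 ≠ [] := by decide

-- stage 6 on a line containing pvBad: the two sides agree up to a common prefix and then
-- carry pvQ (A) versus pvP (B)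
lemma pvT6 : ∀ (n : Nat) (l : List Char), l.length ≤ n → pvBad <:+: l →
    ∃ u x y, pvRep pvP pvQ (pvMsub (pvRules.take 5) l) = u ++ (pvQ ++ x) ∧
             pvMsub (pvRules.take 6) l = u ++ (pvP ++ y) := by
  intro n
  induction n with
  | zero =>
    intro l hl hbad
    have : l = [] := List.eq_nil_of_length_eq_zero (Nat.le_zero.mp hl)
    subst this
    exact absurd hbad (by decide)
  | succ n ih =>
    intro l hl hbad
    match l with
    | [] => exact absurd hbad (by decide)
    | c :: t =>
      have htake6 : pvRules.take 6 = pvRules.take 5 ++ [pvRules[5]!] := by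
        rw [List.take_add_one, pvIdx 5 (by omega)]; rfl
      cases hf : (pvRules.take 5).find? (fun p => p.1.isPrefixOf (c :: t)) with
      | some p =>
        have hf6 : (pvRules.take 6).find? (fun p => p.1.isPrefixOf (c :: t)) = some p := by
          rw [htake6, List.find?_append, hf]; rfl
        have hpmem : p ∈ pvRules.take 5 := List.mem_of_find?_eq_some hf
        have hppre : p.1 <+: c :: t := by
          have := List.find?_some hf
          exact List.isPrefixOf_iff_prefix.mp (by simpa using this)
        obtain ⟨r, hr⟩ := hppre
        have hpall : p ∈ pvRules := List.mem_of_mem_take hpmem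
        have hbk := pvBadKeySfx p hpall
        have hbadr : pvBad <:+: t.drop (p.1.length - 1) := by
          have h1 : pvBad <:+: r := pvInfixSkip hbk.2
            (fun σ hσ hne => hbk.1 σ ((List.mem_tails _ _).mpr hσ) hne) (by rwa [hr])
          rwa [pvPeel (pvTakeKeyNe5 p hpmem) hr] at h1
        obtain ⟨u, x, y, hx, hy⟩ := ih _ (by simp [List.length_drop] at hl ⊢; omega) hbadr
        have hDF2' : ∀ s, s <:+ p.2 → s ≠ [] → ¬ (pvP <+: s) ∧ ¬ (s <+: pvP) := by
          intro s hs hne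
          have := pvDF2 5 (by omega) p hpmem s ((List.mem_tails _ _).mpr hs)
          rcases this with h0 | h1
          · exact absurd h0 hne
          · rwa [pvP5.1] at h1
        refine ⟨p.2 ++ u, x, y, ?_, ?_⟩
        · rw [pvMsub_cons_some hf, pvRep_append pvP pvQ p.2 hDF2', hx, List.append_assoc]
        · rw [pvMsub_cons_some hf6, hy, List.append_assoc]
      | none =>
        by_cases hk6 : pvP <+: c :: t
        · -- an original "EXEC CICS": both sides rewrite it to pvQ; recurse
          obtain ⟨r, hr⟩ := hk6
          have hkp : (pvRules[5]!).1.isPrefixOf (c :: t) = true := by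
            rw [List.isPrefixOf_iff_prefix, pvP5.1]; exact ⟨r, hr⟩
          have hf6 : (pvRules.take 6).find? (fun p => p.1.isPrefixOf (c :: t)) = some (pvRules[5]!) := by
            rw [htake6, List.find?_append, hf, Option.none_or]
            exact List.find?_cons_of_pos (by exact hkp)
          have hrd : r = t.drop ((pvRules[5]!).1.length - 1) := by
            apply pvPeel (pvKeyJNe 5 (by omega))
            rw [pvP5.1]; exact hr
          have hksP : ∀ σ ∈ pvP.tails, σ ≠ [] → ¬ σ <+: pvBad := by decide
          have hbadr : pvBad <:+: r := pvInfixSkip (k := pvP) (by decide)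
            (fun σ hσ hne => hksP σ ((List.mem_tails _ _).mpr hσ) hne) (by rwa [hr])
          have hlen : r.length ≤ n := by
            have h1 := congrArg List.length hr
            simp [pvP] at h1
            simp at hl
            omega
          obtain ⟨u, x, y, hx, hy⟩ := ih r hlen hbadr
          have hDF3' : ∀ s, s <:+ pvP → s ≠ [] → ∀ p ∈ pvRules.take 5, ¬ p.1 <+: s ∧ ¬ s <+: p.1 := by
            intro s hs hne p hp
            have := pvDF3 5 (by omega) p hp s (by rw [pvP5.1]; exact (List.mem_tails _ _).mpr hs)
            rcases this with h0 | h1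
            · exact absurd h0 hne
            · exact h1
          refine ⟨pvQ ++ u, x, y, ?_, ?_⟩
          · rw [← hr, pvMsub_append (pvRules.take 5) pvP (fun p hp s hs hne => hDF3' s hs hne p hp) r,
                pvRep_head pvP pvQ (by decide), hx, List.append_assoc]
          · rw [pvMsub_cons_some hf6, pvP5.2, ← hrd, hy, List.append_assoc]
        · -- no rule fires here
          by_cases hbp : pvBad <+: c :: t
          · -- THE chain site
            obtain ⟨r, hr⟩ := hbp
            have hsplit : (c :: t) = "EXEC CIC".toList ++ ("PIC S9(".toList ++ r) := by
              rw [← hr]; rfl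
            have hcopy5 : ∀ j, j = 5 ∨ j = 6 → pvMsub (pvRules.take j) (c :: t) =
                "EXEC CIC".toList ++ ("SIGNED_NUMERIC_FIELD ".toList ++ pvMsub (pvRules.take j) r) := by
              intro j hj
              have hj7 : j < 7 := by omega
              rw [hsplit, pvMsubCopy (pvRules.take j) _ _
                (fun σ hσ hne p hp => pvCopyFact j hj7 σ ((List.mem_tails _ _).mpr hσ) hne p hp),
                pvMsubPic j hj r]
            have hlitA : ("EXEC CIC".toList : List Char) ++ ("SIGNED_NUMERIC_FIELD ".toList ++ pvMsub (pvRules.take 5) r) =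
                pvP ++ ("IGNED_NUMERIC_FIELD ".toList ++ pvMsub (pvRules.take 5) r) := by
              rw [← List.append_assoc, ← List.append_assoc]
              congr 1
            have hlitB : ("EXEC CIC".toList : List Char) ++ ("SIGNED_NUMERIC_FIELD ".toList ++ pvMsub (pvRules.take 6) r) =
                pvP ++ ("IGNED_NUMERIC_FIELD ".toList ++ pvMsub (pvRules.take 6) r) := by
              rw [← List.append_assoc, ← List.append_assoc]
              congr 1
            refine ⟨[], "IGNED_NUMERIC_FIELD ".toList ++ pvRep pvP pvQ (pvMsub (pvRules.take 5) r),
                "IGNED_NUMERIC_FIELD ".toList ++ pvMsub (pvRules.take 6) r, ?_, ?_⟩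
            · rw [hcopy5 5 (Or.inl rfl), hlitA, pvRep_head pvP pvQ (by decide),
                  pvRep_append pvP pvQ _ (fun σ hσ hne => pvInertI σ ((List.mem_tails _ _).mpr hσ) hne)]
              simp
            · rw [hcopy5 6 (Or.inr rfl), hlitB]
              simp
          · -- plain copy on both sides
            have hkp5 : ¬ (pvRules[5]!).1 <+: c :: t := by rw [pvP5.1]; exact hk6
            have hf6 : (pvRules.take 6).find? (fun p => p.1.isPrefixOf (c :: t)) = none := by
              rw [htake6, List.find?_append, hf, Option.none_or,
                  List.find?_cons_of_neg (by rw [List.isPrefixOf_iff_prefix]; simpa using hkp5), List.find?_nil]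
            have hbadt : pvBad <:+: t := pvBadTail hbad hbp
            obtain ⟨u, x, y, hx, hy⟩ := ih t (by simp at hl; omega) hbadt
            have hghost : ¬ pvP <+: c :: pvMsub (pvRules.take 5) t := by
              have := pvNoGhost 5 (by omega) c t hkp5 (fun _ => hbp)
              rwa [pvP5.1] at this
            refine ⟨c :: u, x, y, ?_, ?_⟩
            · rw [pvMsub_cons_none hf,
                  pvRep_cons_neg pvQ (by rw [List.isPrefixOf_iff_prefix]; simpa using hghost), hx]
              rfl
            · rw [pvMsub_cons_none hf6, hy]
              rfl

-- per line with pvBad: A's result and B's result share a prefix and then diverge as pvQ vs pvP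
lemma pvLineForm (cs : List Char) (hbad : pvBad <:+: cs) :
    ∃ ρ x y, pvReplC.foldl (fun s p => PySem.Chars.replace s p.1 p.2) cs = ρ ++ (pvQ ++ x) ∧
             pvSub cs = ρ ++ (pvP ++ y) := by
  have hA0 : pvReplC.foldl (fun s p => PySem.Chars.replace s p.1 p.2) cs =
      pvRules.foldl (fun s p => pvRep p.1 p.2 s) cs := by
    rw [show pvReplC = pvRules from rfl]; exact pvFoldRep pvRules (by decide) cs
  have hsplit : pvRules.foldl (fun s p => pvRep p.1 p.2 s) cs =
      pvRep (pvRules[7]!).1 (pvRules[7]!).2 (pvRep (pvRules[6]!).1 (pvRules[6]!).2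
        (pvRep (pvRules[5]!).1 (pvRules[5]!).2 ((pvRules.take 5).foldl (fun s p => pvRep p.1 p.2 s) cs))) := rfl
  have hchain5 := pvChain 5 (by omega) cs (fun h6 => absurd h6 (by omega))
  have hB : pvSub cs = pvRep (pvRules[7]!).1 (pvRules[7]!).2
      (pvRep (pvRules[6]!).1 (pvRules[6]!).2 (pvMsub (pvRules.take 6) cs)) := by
    rw [pvSub_eq_msub]
    have h7 := pvStage cs.length cs le_rfl 6 (by omega) (fun h5 => absurd h5 (by omega))
    have h8 := pvStage cs.length cs le_rfl 7 (by omega) (fun h5 => absurd h5 (by omega))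
    have h7' : pvRep (pvRules[6]!).1 (pvRules[6]!).2 (pvMsub (pvRules.take 6) cs) =
        pvMsub (pvRules.take 7) cs := h7
    have h8' : pvRep (pvRules[7]!).1 (pvRules[7]!).2 (pvMsub (pvRules.take 7) cs) =
        pvMsub pvRules cs := h8
    rw [← h8', ← h7']
  obtain ⟨u, x0, y0, hx0, hy0⟩ := pvT6 cs.length cs le_rfl hbad
  obtain ⟨ρ1, hρ1Q, hρ1P⟩ := pvRepPair (pvRules[6]!).1 (pvRules[6]!).2 (by decide)
    (fun σ hσ hne => pvPairFact6.1 σ ((List.mem_tails _ _).mpr hσ) hne)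
    (fun σ hσ hne => pvPairFact6.2.1 σ ((List.mem_tails _ _).mpr hσ) hne)
    (fun σ hσ hne => (pvPairFact6.2.2 σ ((List.mem_tails _ _).mpr hσ) hne).1)
    (fun σ hσ hne => (pvPairFact6.2.2 σ ((List.mem_tails _ _).mpr hσ) hne).2)
    u.length u le_rfl x0 y0
  obtain ⟨ρ2, hρ2Q, hρ2P⟩ := pvRepPair (pvRules[7]!).1 (pvRules[7]!).2 (by decide)
    (fun σ hσ hne => pvPairFact7.1 σ ((List.mem_tails _ _).mpr hσ) hne)
    (fun σ hσ hne => pvPairFact7.2.1 σ ((List.mem_tails _ _).mpr hσ) hne)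
    (fun σ hσ hne => (pvPairFact7.2.2 σ ((List.mem_tails _ _).mpr hσ) hne).1)
    (fun σ hσ hne => (pvPairFact7.2.2 σ ((List.mem_tails _ _).mpr hσ) hne).2)
    ρ1.length ρ1 le_rfl (pvRep (pvRules[6]!).1 (pvRules[6]!).2 x0) (pvRep (pvRules[6]!).1 (pvRules[6]!).2 y0)
  refine ⟨ρ2, pvRep (pvRules[7]!).1 (pvRules[7]!).2 (pvRep (pvRules[6]!).1 (pvRules[6]!).2 x0),
    pvRep (pvRules[7]!).1 (pvRules[7]!).2 (pvRep (pvRules[6]!).1 (pvRules[6]!).2 y0), ?_, ?_⟩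
  · rw [hA0, hsplit, hchain5, pvP5.1, pvP5.2, hx0, hρ1Q, hρ2Q]
  · rw [hB, hy0, hρ1P, hρ2P]

-- the whole-file fold on A's side, line by line, against the B-shaped fold
set_option maxHeartbeats 1000000 in
lemma pvFoldLines : ∀ (lines : List (List Char)),
    (∀ ln ∈ lines, PySem.Chars.strip ln ≠ [] →
      PySem.Chars.startswith (PySem.Chars.strip ln) "*".toList = false →
      ¬ pvBad <:+: PySem.Chars.upper (PySem.Chars.strip ln)) →
    ∀ acc,
    lines.foldl (fun acc line =>
      let l := PySem.Chars.strip line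
      if l = [] ∨ PySem.Chars.startswith l "*".toList = true then acc
      else acc ++ [pvReplC.foldl (fun s p => PySem.Chars.replace s p.1 p.2) (PySem.Chars.upper l)]) acc =
    lines.foldl (fun acc raw =>
      let l := PySem.Chars.strip raw
      if l = [] ∨ PySem.Chars.startswith l "*".toList = true then acc
      else acc ++ [pvSub (PySem.Chars.upper l)]) acc := by
  intro lines
  induction lines with
  | nil => intro _ _; rfl
  | cons ln lines ih =>
    intro h acc
    simp only [List.foldl_cons]
    rw [ih (fun m hm => h m (List.mem_cons_of_mem ln hm))]
    congr 1
    by_cases hc : PySem.Chars.strip ln = [] ∨ PySem.Chars.startswith (PySem.Chars.strip ln) "*".toList = true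
    · simp only [if_pos hc]
    · simp only [if_neg hc]
      rw [not_or] at hc
      rw [pvLine _ (h ln List.mem_cons_self hc.1 (by simpa using hc.2))]

-- the join of a nonempty list starts with its head
lemma pvJoinHead (z : List Char) (R : List (List Char)) :
    ∃ w, PySem.Chars.join " ".toList (z :: R) = z ++ w := by
  cases R with
  | nil => exact ⟨[], by rw [PySem.Chars.join_singleton]; simp⟩
  | cons r R =>
    exact ⟨" ".toList ++ PySem.Chars.join " ".toList (r :: R), by
      rw [PySem.Chars.join_cons_cons, List.append_assoc]⟩

lemma pvJoinCons (a : List Char) (L : List (List Char)) (h : L ≠ []) :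
    PySem.Chars.join " ".toList (a :: L) = (a ++ " ".toList) ++ PySem.Chars.join " ".toList L := by
  match L, h with
  | b :: R, _ => rw [PySem.Chars.join_cons_cons]

-- a pvQ block and a pvP block at the same position make the strings differ
lemma pvPQhead (u x y : List Char) : u ++ (pvQ ++ x) ≠ u ++ (pvP ++ y) := by
  intro h
  have h2 := List.append_cancel_left h
  have h3 : ('T' : Char) = 'E' := congrArg (fun l => l.headD ' ') h2
  exact absurd h3 (by decide)

lemma pvJoinBlockNeq : ∀ (acc : List (List Char)) (u x y : List Char) (RA RB : List (List Char)),
    PySem.Chars.join " ".toList (acc ++ (u ++ (pvQ ++ x)) :: RA) ≠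
    PySem.Chars.join " ".toList (acc ++ (u ++ (pvP ++ y)) :: RB) := by
  intro acc
  induction acc with
  | nil =>
    intro u x y RA RB h
    simp only [List.nil_append] at h
    obtain ⟨wA, hwA⟩ := pvJoinHead (u ++ (pvQ ++ x)) RA
    obtain ⟨wB, hwB⟩ := pvJoinHead (u ++ (pvP ++ y)) RB
    rw [hwA, hwB] at h
    exact pvPQhead u (x ++ wA) (y ++ wB) (by simpa [List.append_assoc] using h)
  | cons a acc ih =>
    intro u x y RA RB h
    rw [List.cons_append, List.cons_append,
        pvJoinCons a _ (by simp), pvJoinCons a _ (by simp)] at h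
    exact ih u x y RA RB (List.append_cancel_left h)

-- the whole outputs differ as soon as one kept line carries pvBad
lemma pvJoinNeq : ∀ (ls : List (List Char)) (acc : List (List Char)),
    (∃ ln ∈ ls, (PySem.Chars.strip ln ≠ [] ∧
        PySem.Chars.startswith (PySem.Chars.strip ln) "*".toList = false) ∧
      pvBad <:+: PySem.Chars.upper (PySem.Chars.strip ln)) →
    PySem.Chars.join " ".toList (ls.foldl (fun acc line =>
      let l := PySem.Chars.strip line
      if l = [] ∨ PySem.Chars.startswith l "*".toList = true then acc
      else acc ++ [pvReplC.foldl (fun s p => PySem.Chars.replace s p.1 p.2) (PySem.Chars.upper l)]) acc) ≠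
    PySem.Chars.join " ".toList (ls.foldl (fun acc raw =>
      let l := PySem.Chars.strip raw
      if l = [] ∨ PySem.Chars.startswith l "*".toList = true then acc
      else acc ++ [pvSub (PySem.Chars.upper l)]) acc) := by
  intro ls
  induction ls with
  | nil =>
    rintro acc ⟨ln, hln, _⟩
    exact absurd hln (List.not_mem_nil)
  | cons ln ls ih =>
    intro acc hex
    simp only [List.foldl_cons]
    by_cases hc : PySem.Chars.strip ln = [] ∨ PySem.Chars.startswith (PySem.Chars.strip ln) "*".toList = true
    · simp only [if_pos hc]
      apply ih acc
      obtain ⟨m, hm, hk, hb⟩ := hex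
      rcases List.mem_cons.mp hm with rfl | hm'
      · rcases hc with h | h
        · exact absurd h hk.1
        · rw [hk.2] at h; exact absurd h (by decide)
      · exact ⟨m, hm', hk, hb⟩
    · simp only [if_neg hc]
      by_cases hb : pvBad <:+: PySem.Chars.upper (PySem.Chars.strip ln)
      · obtain ⟨ρ, x, y, hx, hy⟩ := pvLineForm (PySem.Chars.upper (PySem.Chars.strip ln)) hb
        rw [pvFoldAcc (fun l => pvReplC.foldl (fun s p => PySem.Chars.replace s p.1 p.2) l) ls,
            pvFoldAcc pvSub ls, hx, hy]
        rw [← List.append_cons, ← List.append_cons]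
        exact pvJoinBlockNeq acc ρ x y _ _
      · rw [pvLine _ hb]
        apply ih
        obtain ⟨m, hm, hk, hbm⟩ := hex
        rcases List.mem_cons.mp hm with rfl | hm'
        · exact absurd hbm hb
        · exact ⟨m, hm', hk, hbm⟩

-- ===== VERDICT (by name: the statement is the Claim_ definition above) =====
theorem preprocess_cobol_code_py_spec : Claim_unchanged_preprocess_cobol_code_py := by
  intro source_code _hdom hnD
  show preprocess_cobol_code_py source_code = preprocess_cobol_code_py_alt source_code
  exact (congrArg String.ofList (congrArg (PySem.Chars.join " ".toList)
      (pvFoldLines _ (fun ln hln h1 h2 hbad => hnD ⟨ln, hln, h1, h2, (PySem.Chars.isIn_iff_infix _ _).mpr hbad⟩) []))).trans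
    (congrArg String.ofList (congrArg (PySem.Chars.join " ".toList)
      (pvAltForm (PySem.Chars.splitOn source_code.toList "\n".toList)))).symm

theorem preprocess_cobol_code_py_changed : Claim_changed_preprocess_cobol_code_py := by
  unfold Claim_changed_preprocess_cobol_code_py; decide

theorem preprocess_cobol_code_py_tight : Claim_exact_preprocess_cobol_code_py := by
  intro source_code _hdom hD habs
  obtain ⟨ln, hmem, h1, h2, h3⟩ := hD
  have hAB : (preprocess_cobol_code_py source_code).toList = (preprocess_cobol_code_py_alt source_code).toList :=
    congrArg String.toList habs
  exact pvJoinNeq _ [] ⟨ln, hmem, ⟨h1, h2⟩, (PySem.Chars.isIn_iff_infix _ _).mp h3⟩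
    (((String.toList_ofList).symm.trans hAB).trans
      ((String.toList_ofList).trans (congrArg (PySem.Chars.join " ".toList)
        (pvAltForm (PySem.Chars.splitOn source_code.toList "\n".toList)))))
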